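-- pv_equiv track=rewrite | github.com/tapeau/NSCOM03.lab-activities | Lab 03/src/fig_3.py | calculate_column_parity
-- ===== SOURCE A (Python) =====
-- def calculate_column_parity(matrix):
--     cols = len(matrix[0])
--     col_parity = []
--     for col in range(cols):
--         col_bits = [matrix[row][col] for row in range(len(matrix))]
--         parity_bit = '0' if col_bits.count('1') % 2 == 0 else '1'
--         col_parity.append(parity_bit)
--     return col_parity
-- ===== SOURCE B (Python) =====
-- def calculate_column_parity(matrix):
--     parity = [0] * len(matrix[0])
--     for row in matrix:
--         parity = [p ^ (b == '1') for p, b in zip(parity, row)]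
--     return ['1' if p else '0' for p in parity]
-- ===== Notes on version B (the rewrite author's own statement) =====
-- stated objective: faster
-- what changed: Replaced the column-major double pass that builds a per-column bit list and calls .count on it with a single row-major pass that folds each row into a running per-column XOR parity accumulator via zip.
import Mathlib
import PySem

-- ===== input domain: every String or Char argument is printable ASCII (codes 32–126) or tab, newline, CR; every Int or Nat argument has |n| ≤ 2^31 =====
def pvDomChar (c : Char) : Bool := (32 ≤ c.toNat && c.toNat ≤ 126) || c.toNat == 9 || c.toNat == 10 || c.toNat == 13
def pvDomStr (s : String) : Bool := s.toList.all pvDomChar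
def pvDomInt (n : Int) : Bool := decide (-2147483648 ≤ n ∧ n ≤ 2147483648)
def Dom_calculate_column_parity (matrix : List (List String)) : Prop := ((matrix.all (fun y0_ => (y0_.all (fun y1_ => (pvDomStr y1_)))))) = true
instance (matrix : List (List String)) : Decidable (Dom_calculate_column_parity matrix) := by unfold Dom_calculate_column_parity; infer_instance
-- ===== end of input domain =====

-- B replaces A's column-major per-column bit list + .count with a single row-major zip pass
-- maintaining a running XOR parity accumulator (objective: faster by a constant factor — one cache-friendly row-major pass, no per-column list building).

-- ===== PORT A =====
def calculate_column_parity (matrix : List (List String)) : List String :=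
  let cols : Int := (PySem.List.pyGetD matrix 0 []).length
  (PySem.List.pyRange 0 cols 1).foldl (fun col_parity col =>
    let col_bits : List String :=
      (PySem.List.pyRange 0 (matrix.length : Int) 1).map (fun row =>
        PySem.List.pyGetD (PySem.List.pyGetD matrix row []) col "")
    let parity_bit : String := if col_bits.count "1" % 2 == 0 then "0" else "1"
    col_parity ++ [parity_bit]) []

-- ===== PORT B =====
def calculate_column_parity_alt (matrix : List (List String)) : List String :=
  let parity0 : List Nat := List.replicate (PySem.List.pyGetD matrix 0 []).length 0
  let parity := matrix.foldl (fun parity row =>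
    List.zipWith (fun p b => p ^^^ (if b == "1" then 1 else 0)) parity row) parity0
  parity.map (fun p => if p != 0 then "1" else "0")

-- ===== PRECONDITION & SPEC =====
-- Pre_ excludes exactly the inputs where Python A raises IndexError: the empty matrix
-- (matrix[0]) and ragged matrices with some row shorter than the first row.
def Pre_calculate_column_parity (matrix : List (List String)) : Prop :=
  matrix ≠ [] ∧ ∀ r ∈ matrix, (matrix.headD []).length ≤ r.length
instance (matrix : List (List String)) : Decidable (Pre_calculate_column_parity matrix) := by
  unfold Pre_calculate_column_parity; infer_instance
def pvWitness_calculate_column_parity : List (List String) := [["1", "0"], ["1", "1"]]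
def Spec_calculate_column_parity (matrix : List (List String)) (out : List String) : Prop := out = calculate_column_parity_alt matrix
instance (matrix : List (List String)) (out : List String) : Decidable (Spec_calculate_column_parity matrix out) := by unfold Spec_calculate_column_parity; infer_instance

-- ===== CLAIM (what is proved, stated in full; the proofs are below) =====
def Claim_equal_calculate_column_parity : Prop := ∀ (matrix : List (List String)), Dom_calculate_column_parity matrix → Pre_calculate_column_parity matrix → Spec_calculate_column_parity matrix (calculate_column_parity matrix)

-- ===== LEMMAS AND PROOFS =====

-- the '1'-count of column k, over a list of rows
def pvColCount (xs : List (List String)) (k : Nat) : Nat :=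
  (xs.map (fun r => r.getD k "")).count "1"

theorem pvXorBit (a b : Nat) (ha : a ≤ 1) (hb : b ≤ 1) : a ^^^ b = (a + b) % 2 := by
  interval_cases a <;> interval_cases b <;> decide

-- xor-accumulation of one column's bits equals the column '1'-count mod 2
theorem pvXorCount (k : Nat) (xs : List (List String)) (a : Nat) (ha : a ≤ 1) :
    xs.foldl (fun a r => a ^^^ (if r.getD k "" == "1" then 1 else 0)) a
      = (a + pvColCount xs k) % 2 := by
  induction xs generalizing a with
  | nil => simp [pvColCount]; omega
  | cons r xs ih =>
    have hb : (if r.getD k "" == "1" then (1:Nat) else 0) ≤ 1 := by split <;> simp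
    have hcnt : pvColCount (r :: xs) k
        = pvColCount xs k + (if r.getD k "" == "1" then 1 else 0) := by
      unfold pvColCount
      rw [List.map_cons, List.count_cons]
    simp only [List.foldl_cons]
    rw [ih _ (by rw [pvXorBit a _ ha hb]; omega)]
    rw [pvXorBit a _ ha hb, hcnt]
    omega

-- one zipWith step on a range-map state
theorem pvStep (cols : Nat) (g : Nat → Nat) (row : List String) (hrow : cols ≤ row.length) :
    List.zipWith (fun p b => p ^^^ (if b == "1" then 1 else 0)) ((List.range cols).map g) row
      = (List.range cols).map (fun k => g k ^^^ (if row.getD k "" == "1" then 1 else 0)) := by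
  apply List.ext_getElem
  · simp; omega
  · intro i h1 h2
    simp at h1 ⊢
    rw [List.getElem?_eq_getElem (by omega)]
    simp

-- B's whole fold on a range-map state, column by column
theorem pvFold (cols : Nat) (xs : List (List String)) (g : Nat → Nat)
    (hx : ∀ r ∈ xs, cols ≤ r.length) :
    xs.foldl (fun parity row =>
        List.zipWith (fun p b => p ^^^ (if b == "1" then 1 else 0)) parity row)
      ((List.range cols).map g)
      = (List.range cols).map (fun k =>
          xs.foldl (fun a r => a ^^^ (if r.getD k "" == "1" then 1 else 0)) (g k)) := by
  induction xs generalizing g with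
  | nil => rfl
  | cons r xs ih =>
    simp only [List.foldl_cons]
    rw [pvStep cols g r (hx r List.mem_cons_self)]
    exact ih _ (fun r hr => hx r (List.mem_cons_of_mem _ hr))

-- B's result in closed form
theorem pvB_closed (matrix : List (List String)) (h : Pre_calculate_column_parity matrix) :
    calculate_column_parity_alt matrix =
      (List.range (matrix.headD []).length).map
        (fun k => if pvColCount matrix k % 2 ≠ 0 then "1" else "0") := by
  obtain ⟨m, ms, rfl⟩ : ∃ m ms, matrix = m :: ms := by
    cases matrix with
    | nil => exact absurd rfl h.1
    | cons m ms => exact ⟨m, ms, rfl⟩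
  unfold calculate_column_parity_alt
  simp only [PySem.List.pyGetD_zero_cons]
  have hrep : List.replicate m.length (0:Nat) = (List.range m.length).map (fun _ => 0) := by
    simp [List.map_const']
  rw [hrep, pvFold m.length (m :: ms) (fun _ => 0) (by simpa using h.2), List.map_map]
  refine List.map_congr_left (fun k _ => ?_)
  simp only [Function.comp_apply]
  rw [pvXorCount k (m :: ms) 0 (by omega)]
  simp only [Nat.zero_add]
  by_cases hc : pvColCount (m :: ms) k % 2 = 0 <;> simp [hc]

-- indexing a list by range(len) is the list itself
theorem pvMapRangeGetD (xs : List (List String)) (g : List String → String) :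
    (List.range xs.length).map (fun j => g (xs.getD j [])) = xs.map g := by
  apply List.ext_getElem
  · simp
  · intro i h1 h2
    simp only [List.getElem_map, List.getElem_range]
    rw [List.getD_eq_getElem xs [] (show i < xs.length by simpa using h1)]

-- A's result in closed form
theorem pvA_closed (matrix : List (List String)) (h : Pre_calculate_column_parity matrix) :
    calculate_column_parity matrix =
      (List.range (matrix.headD []).length).map
        (fun k => if pvColCount matrix k % 2 = 0 then "0" else "1") := by
  obtain ⟨m, ms, rfl⟩ : ∃ m ms, matrix = m :: ms := by
    cases matrix with
    | nil => exact absurd rfl h.1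
    | cons m ms => exact ⟨m, ms, rfl⟩
  unfold calculate_column_parity
  simp only [PySem.List.pyGetD_zero_cons]
  rw [PySem.List.foldl_append_singleton_eq_map]
  simp only [List.nil_append]
  rw [PySem.List.pyRange_zero_nat, PySem.List.pyRange_zero_nat, List.map_map]
  refine List.map_congr_left (fun k hk => ?_)
  simp only [Function.comp_apply, List.map_map, Function.comp_def, PySem.List.pyGetD_natCast]
  rw [pvMapRangeGetD (m :: ms) (fun r => r.getD k "")]
  simp [pvColCount]

-- ===== VERDICT (by name: the statement is the Claim_ definition above) =====
theorem calculate_column_parity_spec : Claim_equal_calculate_column_parity := by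
  intro matrix _ hpre
  unfold Spec_calculate_column_parity
  rw [pvA_closed matrix hpre, pvB_closed matrix hpre]
  refine List.map_congr_left (fun k _ => ?_)
  by_cases h : pvColCount matrix k % 2 = 0 <;> simp [h]
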